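-- pv_equiv track=rewrite | github.com/hadekunle/ade-devopswithbuddiex | consecutive_occurences/consecutive_occurences_solution_ade.py | top_three
-- ===== SOURCE A (Python) =====
-- def top_three(input):
--     string = input + '-'
--     count, count_list = 1,[]
--     for i in range(1,len(string)):
--         if string[i]==string[i-1]:
--             count += 1
--         else:
--             count_list.append((count, string[i-1]))
--             count = 1
--     count_list = sorted(count_list, key=lambda x: x[0], reverse=True )
--     return count_list[:3]
-- ===== SOURCE B (Python) =====
-- def top_three(input):
--     # Runs are collected back-to-front (iterating the sentinel-terminated
--     # string in reverse, merging into the last collected run), and the top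
--     # three are selected online with a bounded insertion buffer -- no sort.
--     s = input + '-'
--     rev = []  # runs of s, last run first; rev[0] is the sentinel '-' run
--     for ch in reversed(s):
--         if rev and rev[-1][1] == ch:
--             rev[-1] = (rev[-1][0] + 1, ch)
--         else:
--             rev.append((1, ch))
--     groups = rev[1:][::-1]  # drop the sentinel run, restore forward order
--     top = []  # at most 3 runs, counts non-increasing, ties in input order
--     for run in groups:
--         k = sum(1 for t in top if t[0] >= run[0])
--         top.insert(k, run)
--         del top[3:]
--     return top
-- ===== Notes on version B (the rewrite author's own statement) =====
-- stated objective: alternative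
-- what changed: A counts runs in a left-to-right predecessor-comparison pass, sorts the whole run list descending and slices the first three; B collects the runs back-to-front by iterating the reversed sentinel string and merging into the last collected run, then never sorts: it selects the top three online with a bounded 3-slot insertion buffer.
import Mathlib
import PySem

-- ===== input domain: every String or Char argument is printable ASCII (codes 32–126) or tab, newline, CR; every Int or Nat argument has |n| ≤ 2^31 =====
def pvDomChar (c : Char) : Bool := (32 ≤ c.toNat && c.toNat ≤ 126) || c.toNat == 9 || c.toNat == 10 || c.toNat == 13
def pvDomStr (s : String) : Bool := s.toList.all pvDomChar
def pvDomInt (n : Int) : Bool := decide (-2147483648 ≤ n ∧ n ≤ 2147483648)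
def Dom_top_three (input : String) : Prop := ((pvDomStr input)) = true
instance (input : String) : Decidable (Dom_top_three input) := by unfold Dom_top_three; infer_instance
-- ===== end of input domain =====

-- B groups runs back-to-front over the reversed sentinel string and selects the
-- top three online with a bounded insertion buffer instead of sorting; same
-- result, different algorithm (alternative, no speed claim).

-- ===== PORT A =====
-- loop body of A's 'for i in range(1, len(string))'; indices i and i-1 are
-- always in range there, so pyGetD (default never used) is exact
def stepA (s : List Char) (st : Int × List (Int × String)) (i : Int) : Int × List (Int × String) :=
  if PySem.List.pyGetD s i 'a' = PySem.List.pyGetD s (i - 1) 'a' then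
    (st.1 + 1, st.2)
  else
    ((1 : Int), st.2 ++ [(st.1, String.ofList [PySem.List.pyGetD s (i - 1) 'a'])])

def top_three (input : String) : List (Int × String) :=
  PySem.List.slice
    (PySem.List.sorted
      (((PySem.List.pyRange 1 (((input.toList ++ ['-']).length : Int)) 1).foldl
          (stepA (input.toList ++ ['-'])) ((1 : Int), ([] : List (Int × String)))).2)
      (·.1) true) none (some 3)

-- ===== PORT B =====
-- body of B's 'for ch in reversed(s)': merge ch into the last collected run
-- (rev[-1]) or append a fresh run (1, ch)
def stepRevB (acc : List (Int × String)) (c : Char) : List (Int × String) :=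
  match acc.getLast? with
  | some l =>
      if l.2 = String.ofList [c] then acc.dropLast ++ [(l.1 + 1, String.ofList [c])]
      else acc ++ [((1 : Int), String.ofList [c])]
  | none => [((1 : Int), String.ofList [c])]

-- body of B's 'for run in groups': k = sum(1 for t in top if t[0] >= run[0])
-- (the 0/1-sum is the count, see PYSEM.md on countP); top.insert(k, run);
-- 'del top[3:]' keeps the first three
def stepTopB (top : List (Int × String)) (run : Int × String) : List (Int × String) :=
  (PySem.List.insert top ((top.countP (fun t => run.1 ≤ t.1) : Nat) : Int) run).take 3

def top_three_alt (input : String) : List (Int × String) :=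
  let s := input.toList ++ ['-']
  let rev := s.reverse.foldl stepRevB []
  -- rev[1:][::-1]; '[::-1]' is reverse (PySem.List.slice?_none_none_neg_one)
  let groups := (PySem.List.slice rev (some 1) none).reverse
  groups.foldl stepTopB []

-- ===== PRECONDITION & SPEC =====
def Spec_top_three (input : String) (out : List (Int × String)) : Prop := out = top_three_alt input
instance (input : String) (out : List (Int × String)) : Decidable (Spec_top_three input out) := by unfold Spec_top_three; infer_instance

-- ===== CLAIM (what is proved, stated in full; the proofs are below) =====
def Claim_equal_top_three : Prop := ∀ (input : String), Dom_top_three input → Spec_top_three input (top_three input)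

-- ===== LEMMAS AND PROOFS =====

-- A's index loop, rewritten structurally: remaining chars, previous char, count, acc
def loopA : List Char → Char → Int → List (Int × String) → Int × List (Int × String)
  | [], _, count, acc => (count, acc)
  | c :: cs, prev, count, acc =>
    if c = prev then loopA cs c (count + 1) acc
    else loopA cs c 1 (acc ++ [(count, String.ofList [prev])])

-- the run list both programs compute, as a reference recursion
def runsOf : List Char → List (Int × String)
  | [] => []
  | c :: rest =>
    ((1 : Int) + ((rest.takeWhile (· = c)).length : Int), String.ofList [c])
      :: runsOf (rest.dropWhile (· = c))
termination_by l => l.length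
decreasing_by
  exact Nat.lt_succ_of_le (List.length_dropWhile_le _ _)

lemma pyGetD_mid (pre post : List Char) (x d : Char) :
    PySem.List.pyGetD (pre ++ x :: post) (pre.length : Int) d = x := by
  simp [PySem.List.pyGetD_natCast, List.getD_eq_getElem?_getD]

lemma foldA_eq (l : List Char) (pre : List Char) (prev : Char) (count : Int)
    (acc : List (Int × String)) :
    (PySem.List.pyRange ((pre.length : Int) + 1) (((pre ++ prev :: l).length : Int)) 1).foldl
      (stepA (pre ++ prev :: l)) (count, acc) = loopA l prev count acc := by
  induction l generalizing pre prev count acc with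
  | nil =>
      rw [PySem.List.pyRange_one_eq_nil (by simp)]
      simp [loopA]
  | cons c cs ih =>
      rw [PySem.List.pyRange_one_cons (by simp), List.foldl_cons]
      have h1 : PySem.List.pyGetD (pre ++ prev :: c :: cs) ((pre.length : Int) + 1) 'a' = c := by
        simpa using pyGetD_mid (pre ++ [prev]) cs c 'a'
      have hnext :
          ∀ st : Int × List (Int × String),
            (PySem.List.pyRange ((pre.length : Int) + 1 + 1)
                (((pre ++ prev :: c :: cs).length : Int)) 1).foldl
              (stepA (pre ++ prev :: c :: cs)) st = loopA cs c st.1 st.2 := by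
        intro st
        obtain ⟨cnt, ac⟩ := st
        have h := ih (pre ++ [prev]) c cnt ac
        rw [show ((pre ++ [prev]).length : Int) = (pre.length : Int) + 1 by simp] at h
        simpa only [List.append_assoc, List.singleton_append] using h
      rw [show stepA (pre ++ prev :: c :: cs) (count, acc) ((pre.length : Int) + 1)
            = if c = prev then (count + 1, acc)
              else ((1 : Int), acc ++ [(count, String.ofList [prev])]) by
            simp [stepA, h1]]
      by_cases hc : c = prev
      · rw [if_pos hc, hnext, show loopA (c :: cs) prev count acc = loopA cs c (count + 1) acc by
          rw [loopA, if_pos hc]]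
      · rw [if_neg hc, hnext, show loopA (c :: cs) prev count acc
            = loopA cs c 1 (acc ++ [(count, String.ofList [prev])]) by
          rw [loopA, if_neg hc]]

lemma loopA_snd (l : List Char) (prev : Char) (count : Int) (acc : List (Int × String)) :
    (loopA l prev count acc).2 =
      acc ++ (((count + ((l.takeWhile (· = prev)).length : Int), String.ofList [prev])
                :: runsOf (l.dropWhile (· = prev))).dropLast) := by
  induction l generalizing prev count acc with
  | nil => simp [loopA, runsOf]
  | cons c cs ih =>
      by_cases hc : c = prev
      · subst hc
        rw [show loopA (c :: cs) c count acc = loopA cs c (count + 1) acc by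
          rw [loopA, if_pos rfl]]
        rw [ih c (count + 1) acc]
        simp only [List.takeWhile_cons, List.dropWhile_cons, decide_true, if_true]
        rw [show count + 1 + ((cs.takeWhile (· = c)).length : Int)
              = count + (((c :: cs.takeWhile (· = c)).length : Int)) by simp [List.length_cons]; ring]
      · rw [show loopA (c :: cs) prev count acc
            = loopA cs c 1 (acc ++ [(count, String.ofList [prev])]) by
          rw [loopA, if_neg hc]]
        rw [ih c 1 (acc ++ [(count, String.ofList [prev])])]
        simp only [List.takeWhile_cons, List.dropWhile_cons, decide_eq_true_eq]
        rw [if_neg hc, if_neg hc]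
        rw [show runsOf (c :: cs)
              = ((1 : Int) + ((cs.takeWhile (· = c)).length : Int), String.ofList [c])
                :: runsOf (cs.dropWhile (· = c)) from by rw [runsOf]]
        simp [List.dropLast_cons₂]

-- equation lemmas for the wf-recursive runsOf
lemma runsOf_nil : runsOf [] = [] := by rw [runsOf]

lemma runsOf_cons (c : Char) (rest : List Char) :
    runsOf (c :: rest)
      = ((1 : Int) + ((rest.takeWhile (· = c)).length : Int), String.ofList [c])
        :: runsOf (rest.dropWhile (· = c)) := by rw [runsOf]

-- B's reversed grouping loop builds the run list of l, last run first
lemma foldRev_eq (l : List Char) :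
    l.reverse.foldl stepRevB [] = (runsOf l).reverse := by
  rw [List.foldl_reverse]
  induction l with
  | nil => rw [runsOf_nil]; rfl
  | cons c cs ih =>
      rw [List.foldr_cons, ih, runsOf_cons c cs]
      cases cs with
      | nil => simp [stepRevB, runsOf_nil]
      | cons d ds =>
          rw [runsOf_cons d ds]
          by_cases hc : d = c
          · subst hc
            simp only [List.reverse_cons, stepRevB, List.getLast?_concat,
              List.takeWhile_cons, List.dropWhile_cons, decide_true, if_true,
              List.dropLast_concat]
            rw [show ((1 : Int) + ((List.takeWhile (fun x => decide (x = d)) ds).length : Int)) + 1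
                  = 1 + (((d :: List.takeWhile (fun x => decide (x = d)) ds).length : Nat) : Int) by
                push_cast [List.length_cons]; ring]
          · have hne : String.ofList [d] ≠ String.ofList [c] := by
              intro h
              exact hc (by simpa using congrArg String.toList h)
            simp only [List.reverse_cons, stepRevB, List.getLast?_concat,
              List.takeWhile_cons, List.dropWhile_cons, hc, decide_false]
            rw [if_neg hne]
            simp [runsOf_cons d ds]

-- (l.reverse.drop 1).reverse = l.dropLast, used for rev[1:][::-1]
lemma reverse_drop_one_reverse {a : Type} (l : List a) :
    (l.reverse.drop 1).reverse = l.dropLast := by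
  induction l using List.reverseRecOn with
  | nil => rfl
  | append_singleton l x _ => simp

-- insertBy with the descending-count rule splits at the first strictly smaller count
lemma insertBy_split (x : Int × String) (l : List (Int × String)) :
    PySem.List.insertBy (fun a b => decide (b.1 < a.1)) x l
      = l.takeWhile (fun t => decide (x.1 ≤ t.1)) ++ x :: l.dropWhile (fun t => decide (x.1 ≤ t.1)) := by
  induction l with
  | nil => rfl
  | cons y ys ih =>
      by_cases h : y.1 < x.1
      · rw [show PySem.List.insertBy (fun a b => decide (b.1 < a.1)) x (y :: ys)
              = x :: y :: ys from by simp [PySem.List.insertBy, h]]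
        rw [List.takeWhile_cons, List.dropWhile_cons]
        rw [if_neg (by simpa using not_le_of_gt h), if_neg (by simpa using not_le_of_gt h)]
        rfl
      · rw [show PySem.List.insertBy (fun a b => decide (b.1 < a.1)) x (y :: ys)
              = y :: PySem.List.insertBy (fun a b => decide (b.1 < a.1)) x ys from by
            simp [PySem.List.insertBy, h]]
        rw [List.takeWhile_cons, List.dropWhile_cons]
        rw [if_pos (by simpa using le_of_not_gt h), if_pos (by simpa using le_of_not_gt h)]
        rw [ih]
        rfl

-- on a non-increasing list the count of >=-elements is the length of the >=-prefix
lemma countP_eq_takeWhile_length (x : Int) (l : List (Int × String))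
    (h : l.Pairwise (fun a b => b.1 <= a.1)) :
    l.countP (fun t => decide (x <= t.1)) = (l.takeWhile (fun t => decide (x <= t.1))).length := by
  induction l with
  | nil => rfl
  | cons y ys ih =>
      rw [List.pairwise_cons] at h
      rw [List.countP_cons, List.takeWhile_cons]
      by_cases hy : x <= y.1
      · rw [if_pos (by simpa using hy), if_pos (by simpa using hy)]
        rw [ih h.2, List.length_cons]
      · rw [if_neg (by simpa using hy), if_neg (by simpa using hy)]
        have hz : ys.countP (fun t => decide (x <= t.1)) = 0 := by
          rw [List.countP_eq_zero]
          intro t ht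
          simp only [decide_eq_true_eq]
          intro hxt
          exact hy (le_trans hxt (h.1 t ht))
        rw [hz]
        rfl

-- inserting into the 3-truncation, then truncating, = inserting fully, then truncating
lemma trunc_insert (p : Int × String → Bool) (x : Int × String) :
    ∀ (n : Nat) (l : List (Int × String)),
      (((l.take n).takeWhile p ++ x :: (l.take n).dropWhile p).take n)
        = ((l.takeWhile p ++ x :: l.dropWhile p).take n) := by
  intro n l
  induction l generalizing n with
  | nil => simp
  | cons a l ih =>
      cases n with
      | zero => simp
      | succ m =>
          rw [List.take_succ_cons]
          by_cases hp : p a = true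
          · rw [List.takeWhile_cons, List.dropWhile_cons, if_pos hp, if_pos hp,
               List.takeWhile_cons, List.dropWhile_cons, if_pos hp, if_pos hp]
            rw [List.cons_append, List.take_succ_cons, List.cons_append, List.take_succ_cons,
               ih m]
          · rw [List.takeWhile_cons, List.dropWhile_cons, if_neg hp, if_neg hp,
               List.takeWhile_cons, List.dropWhile_cons, if_neg hp, if_neg hp]
            simp only [List.nil_append, List.take_succ_cons]
            cases m with
            | zero => simp
            | succ k =>
                rw [List.take_succ_cons, List.take_succ_cons, List.take_take]
                rw [Nat.min_eq_left (Nat.le_succ k)]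

-- B's bounded insertion step = full stable insertion followed by truncation
lemma stepTopB_eq (x : Int × String) (l : List (Int × String))
    (h : l.Pairwise (fun a b => b.1 <= a.1)) :
    stepTopB (l.take 3) x
      = (PySem.List.insertBy (fun a b => decide (b.1 < a.1)) x l).take 3 := by
  have h3 : (l.take 3).Pairwise (fun a b : Int × String => b.1 <= a.1) :=
    h.sublist (List.take_sublist 3 l)
  unfold stepTopB
  rw [PySem.List.insert_natCast _ _ _ List.countP_le_length]
  rw [countP_eq_takeWhile_length x.1 (l.take 3) h3]
  set A := (l.take 3).takeWhile (fun t => decide (x.1 <= t.1)) with hA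
  set B := (l.take 3).dropWhile (fun t => decide (x.1 <= t.1)) with hB
  have hsplit : l.take 3 = A ++ B := by
    rw [hA, hB, List.takeWhile_append_dropWhile]
  rw [hsplit, List.take_left' rfl, List.drop_left' rfl, hA, hB, insertBy_split,
    trunc_insert]

-- the selection loop over the run list = stable descending sort truncated to three
lemma foldTop_eq (G : List (Int × String)) :
    G.foldl stepTopB [] = (PySem.List.sorted G (·.1) true).take 3 := by
  induction G using List.reverseRecOn with
  | nil => rfl
  | append_singleton G x ih =>
      rw [List.foldl_append, List.foldl_cons, List.foldl_nil, ih]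
      rw [PySem.List.sorted_rev_eq_foldl_insertBy (G ++ [x]), List.foldl_append,
        List.foldl_cons, List.foldl_nil, ← PySem.List.sorted_rev_eq_foldl_insertBy G]
      exact stepTopB_eq x (PySem.List.sorted G (·.1) true)
        (PySem.List.sorted_pairwise_rev G (·.1))

-- B, assembled: the top three of the descending-sorted run list
lemma alt_eq (input : String) :
    top_three_alt input
      = (PySem.List.sorted ((runsOf (input.toList ++ ['-'])).dropLast) (·.1) true).take 3 := by
  show ((PySem.List.slice ((input.toList ++ ['-']).reverse.foldl stepRevB []) (some 1) none).reverse).foldl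
        stepTopB [] = _
  rw [foldRev_eq, PySem.List.slice_from _ (by norm_num), foldTop_eq]
  rw [show (1 : Int).toNat = 1 from rfl, reverse_drop_one_reverse]

-- ===== VERDICT (by name: the statement is the Claim_ definition above) =====
theorem top_three_spec : Claim_equal_top_three := by
  intro input _
  unfold Spec_top_three top_three
  obtain ⟨a, t, hs⟩ : ∃ a t, input.toList ++ ['-'] = a :: t := by
    cases h : input.toList with
    | nil => exact ⟨'-', [], by simp⟩
    | cons x xs => exact ⟨x, xs ++ ['-'], by simp⟩
  rw [alt_eq input, hs]
  have hfold := foldA_eq t [] a 1 []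
  simp only [List.nil_append, List.length_nil, Nat.cast_zero, zero_add] at hfold
  rw [hfold, loopA_snd]
  rw [show runsOf (a :: t)
        = ((1 : Int) + ((t.takeWhile (· = a)).length : Int), String.ofList [a])
          :: runsOf (t.dropWhile (· = a)) from by rw [runsOf]]
  rw [PySem.List.slice_to _ (by norm_num)]
  simp
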